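-- pv_equiv track=rewrite | github.com/archana1998/LEIA | models/texture.py | separate_group_ids
-- ===== SOURCE A (Python) =====
-- def separate_group_ids(group_ids):
--     joint1_ids, joint2_ids, joint3_ids = [], [], []
--     for ele in group_ids:
--         if ele < 40:
--             joint1_ids.append(ele)
--         elif ele < 80:
--             joint2_ids.append(ele)
--         else:
--             joint3_ids.append(ele)
--     return [joint1_ids, joint2_ids, joint3_ids]
-- ===== SOURCE B (Python) =====
-- def separate_group_ids(group_ids):
--     xs = list(group_ids)
--     return [[e for e in xs if e < 40],
--             [e for e in xs if 40 <= e < 80],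
--             [e for e in xs if e >= 80]]
-- ===== Notes on version B (the rewrite author's own statement) =====
-- stated objective: idiomatic
-- what changed: Replaced the single conditional pass that appends into three accumulators with three independent filtering comprehensions over the materialized list, one per band.
import Mathlib
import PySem

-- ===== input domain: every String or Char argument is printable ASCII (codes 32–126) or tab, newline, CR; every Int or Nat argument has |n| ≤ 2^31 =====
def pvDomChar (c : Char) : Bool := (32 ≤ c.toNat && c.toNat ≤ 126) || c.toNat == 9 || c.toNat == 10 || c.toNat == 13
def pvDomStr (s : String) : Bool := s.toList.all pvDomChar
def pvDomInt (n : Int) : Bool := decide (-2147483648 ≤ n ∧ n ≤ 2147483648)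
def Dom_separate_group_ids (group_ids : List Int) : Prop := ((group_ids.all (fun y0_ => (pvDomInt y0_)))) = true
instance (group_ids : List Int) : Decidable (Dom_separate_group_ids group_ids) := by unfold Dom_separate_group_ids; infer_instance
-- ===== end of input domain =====

-- B replaces A's single pass with three accumulators by three independent filtering passes (idiomatic, same cost).


-- ===== PORT A =====
-- the for-loop over group_ids with the three accumulator lists as explicit arguments
def sgiLoop (joint1_ids joint2_ids joint3_ids : List Int) : List Int → List (List Int)
  | [] => [joint1_ids, joint2_ids, joint3_ids]
  | ele :: rest =>
    if ele < 40 then sgiLoop (joint1_ids ++ [ele]) joint2_ids joint3_ids rest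
    else if ele < 80 then sgiLoop joint1_ids (joint2_ids ++ [ele]) joint3_ids rest
    else sgiLoop joint1_ids joint2_ids (joint3_ids ++ [ele]) rest

def separate_group_ids (group_ids : List Int) : List (List Int) :=
  sgiLoop [] [] [] group_ids

-- ===== PORT B =====
def separate_group_ids_alt (group_ids : List Int) : List (List Int) :=
  [group_ids.filter (fun e => e < 40),
   group_ids.filter (fun e => 40 ≤ e && e < 80),
   group_ids.filter (fun e => 80 ≤ e)]

-- ===== PRECONDITION & SPEC =====
def Spec_separate_group_ids (group_ids : List Int) (out : List (List Int)) : Prop := out = separate_group_ids_alt group_ids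
instance (group_ids : List Int) (out : List (List Int)) : Decidable (Spec_separate_group_ids group_ids out) := by unfold Spec_separate_group_ids; infer_instance

-- ===== CLAIM (what is proved, stated in full; the proofs are below) =====
def Claim_equal_separate_group_ids : Prop := ∀ (group_ids : List Int), Dom_separate_group_ids group_ids → Spec_separate_group_ids group_ids (separate_group_ids group_ids)

-- ===== LEMMAS AND PROOFS =====
theorem sgi_fold (xs a b c : List Int) :
    sgiLoop a b c xs
    = [a ++ xs.filter (fun e => e < 40),
       b ++ xs.filter (fun e => 40 ≤ e && e < 80),
       c ++ xs.filter (fun e => 80 ≤ e)] := by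
  induction xs generalizing a b c with
  | nil => simp [sgiLoop]
  | cons x xs ih =>
    by_cases h1 : x < 40
    · simp [sgiLoop, h1, ih, show ¬ (40 ≤ x) by omega, show x < 80 by omega]
    · by_cases h2 : x < 80
      · simp [sgiLoop, h1, h2, ih, show (40:Int) ≤ x by omega,
          show ¬ (80 ≤ x) by omega]
      · simp [sgiLoop, h1, h2, ih, show (80:Int) ≤ x by omega]

-- ===== VERDICT (by name: the statement is the Claim_ definition above) =====
theorem separate_group_ids_spec : Claim_equal_separate_group_ids := by
  intro xs _
  show separate_group_ids xs = separate_group_ids_alt xs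
  simp [separate_group_ids, separate_group_ids_alt, sgi_fold]
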